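-- pv_equiv track=rewrite | github.com/clunaslunas/CarCode | NetBeansProjects/HomeWork3/src/CS2HW3.py | hashing_Values
-- ===== SOURCE A (Python) =====
-- def hashing_Values(hshArry, numArray):
--
--     # Counters
--     i = 0 # Counts through the while loop
--     j = 0 # counts through the number array
--
--     # Creating the list and the array that holds them
--     arrayOfBuckets = [0,0,0,0,0,0,0,0,0,0,0] # Array that holds list
--     hsh0 = list() # Holds % 0
--     hsh1 = list() # Holds % 1
--     hsh2 = list() # Holds % 2
--     hsh3 = list() # Holds % 3
--     hsh4 = list() # Holds % 4
--     hsh5 = list() # Holds % 5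
--     hsh6 = list() # Holds % 6
--     hsh7 = list() # Holds % 7
--     hsh8 = list() # Holds % 8
--     hsh9 = list() # Holds % 9
--     hsh10 = list() # Holds % 10
--
--     # While loop that incraments through the buckets
--     while i < len(numArray):
--         # Hashing the input values
--         hashVal = numArray[j] % 11
--
--         # if statements that place number in bucket
--         if hashVal == 0:
--             hsh0.append(numArray[j]) # adds the value to list with that mod
--             hshArry[0] += 1         # counts buckets
--         elif hashVal == 1:
--             hsh1.append(numArray[j]) # adds the value to list with that mod
--             hshArry[1] += 1         # counts buckets
--         elif hashVal == 2:
--             hsh2.append(numArray[j]) # adds the value to list with that mod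
--             hshArry[2] += 1         # counts buckets
--         elif hashVal == 3:
--             hsh3.append(numArray[j]) # adds the value to list with that mod
--             hshArry[3] += 1         # counts buckets
--         elif hashVal == 4:
--             hsh4.append(numArray[j]) # adds the value to list with that mod
--             hshArry[4] += 1         # counts buckets
--         elif hashVal == 5:
--             hsh5.append(numArray[j]) # adds the value to list with that mod
--             hshArry[5] += 1         # counts buckets
--         elif hashVal == 6:
--             hsh6.append(numArray[j]) # adds the value to list with that mod
--             hshArry[6] += 1         # counts buckets
--         elif hashVal == 7:
--             hsh7.append(numArray[j]) # adds the value to list with that mod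
--             hshArry[7] += 1         # counts buckets
--         elif hashVal == 8:
--             hsh8.append(numArray[j]) # adds the value to list with that mod
--             hshArry[8] += 1         # counts buckets
--         elif hashVal == 9:
--             hsh9.append(numArray[j]) # adds the value to list with that mod
--             hshArry[9] += 1         # counts buckets
--         elif hashVal == 10:
--             hsh10.append(numArray[j]) # adds the value to list with that mod
--             hshArry[10] += 1         # counts buckets
--         j +=1 # Incramenting i
--         i +=1 # Incramenting j
--
--
--     # adding list to array
--     arrayOfBuckets[0] = hsh0
--     arrayOfBuckets[1] = hsh1
--     arrayOfBuckets[2] = hsh2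
--     arrayOfBuckets[3] = hsh3
--     arrayOfBuckets[4] = hsh4
--     arrayOfBuckets[5] = hsh5
--     arrayOfBuckets[6] = hsh6
--     arrayOfBuckets[7] = hsh7
--     arrayOfBuckets[8] = hsh8
--     arrayOfBuckets[9] = hsh9
--     arrayOfBuckets[10] = hsh10
--
--
--     #returning the bucket array
--     return arrayOfBuckets
-- ===== SOURCE B (Python) =====
-- def hashing_Values(hshArry, numArray):
--     # Residue-class decomposition: one filtering pass per residue 0..10.
--     # Mutates hshArry exactly as A does (counts per occupied residue).
--     arrayOfBuckets = [[] for _ in range(11)]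
--     for r in range(11):
--         bucket = [v for v in numArray if v % 11 == r]
--         arrayOfBuckets[r] = bucket
--         if bucket:
--             hshArry[r] += len(bucket)
--     return arrayOfBuckets
-- ===== Notes on version B (the rewrite author's own statement) =====
-- stated objective: alternative
-- what changed: Replaced A's single element-dispatch pass through an 11-way elif chain into eleven named lists by a per-residue decomposition: for each r in 0..10 one filter of numArray selects the residue class, assigned into a generic list of buckets.
-- outside the precondition, e.g. on hashing_Values([0, 0], [7]): A raises IndexError, B raises IndexError
import Mathlib
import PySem

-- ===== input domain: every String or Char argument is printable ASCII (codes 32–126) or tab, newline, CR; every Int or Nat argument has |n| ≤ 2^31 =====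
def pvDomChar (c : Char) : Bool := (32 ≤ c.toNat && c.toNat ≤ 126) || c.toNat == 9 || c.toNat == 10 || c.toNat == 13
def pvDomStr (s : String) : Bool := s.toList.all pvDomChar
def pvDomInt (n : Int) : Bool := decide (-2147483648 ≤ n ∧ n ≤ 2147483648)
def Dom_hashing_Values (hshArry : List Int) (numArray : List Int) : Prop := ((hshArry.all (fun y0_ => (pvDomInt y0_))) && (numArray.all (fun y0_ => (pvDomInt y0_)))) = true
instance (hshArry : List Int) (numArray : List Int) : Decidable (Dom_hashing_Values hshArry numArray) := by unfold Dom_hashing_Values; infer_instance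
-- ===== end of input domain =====

-- B replaces A's single dispatch pass with one filter pass per residue class (objective: alternative
-- decomposition, same cost class). Both A and B mutate hshArry identically (incrementing counters);
-- the equivalence proved here is about the RETURN value only.

-- ===== PORT A =====
-- while loop over numArray, appending each value to one of the 11 named lists by its value mod 11
def pvLoopA (nums : List Int) (h0 h1 h2 h3 h4 h5 h6 h7 h8 h9 h10 : List Int) : List (List Int) :=
  match nums with
  | [] => [h0, h1, h2, h3, h4, h5, h6, h7, h8, h9, h10]
  | v :: rest =>
    let hashVal := PySem.Int.mod v 11
    if hashVal == 0 then pvLoopA rest (h0 ++ [v]) h1 h2 h3 h4 h5 h6 h7 h8 h9 h10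
    else if hashVal == 1 then pvLoopA rest h0 (h1 ++ [v]) h2 h3 h4 h5 h6 h7 h8 h9 h10
    else if hashVal == 2 then pvLoopA rest h0 h1 (h2 ++ [v]) h3 h4 h5 h6 h7 h8 h9 h10
    else if hashVal == 3 then pvLoopA rest h0 h1 h2 (h3 ++ [v]) h4 h5 h6 h7 h8 h9 h10
    else if hashVal == 4 then pvLoopA rest h0 h1 h2 h3 (h4 ++ [v]) h5 h6 h7 h8 h9 h10
    else if hashVal == 5 then pvLoopA rest h0 h1 h2 h3 h4 (h5 ++ [v]) h6 h7 h8 h9 h10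
    else if hashVal == 6 then pvLoopA rest h0 h1 h2 h3 h4 h5 (h6 ++ [v]) h7 h8 h9 h10
    else if hashVal == 7 then pvLoopA rest h0 h1 h2 h3 h4 h5 h6 (h7 ++ [v]) h8 h9 h10
    else if hashVal == 8 then pvLoopA rest h0 h1 h2 h3 h4 h5 h6 h7 (h8 ++ [v]) h9 h10
    else if hashVal == 9 then pvLoopA rest h0 h1 h2 h3 h4 h5 h6 h7 h8 (h9 ++ [v]) h10
    else if hashVal == 10 then pvLoopA rest h0 h1 h2 h3 h4 h5 h6 h7 h8 h9 (h10 ++ [v])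
    else pvLoopA rest h0 h1 h2 h3 h4 h5 h6 h7 h8 h9 h10

def hashing_Values (hshArry : List Int) (numArray : List Int) : List (List Int) :=
  -- hshArry is only mutated (counter increments), never read into the result; the
  -- final assembly of arrayOfBuckets from the 11 lists is pvLoopA's base case
  pvLoopA numArray [] [] [] [] [] [] [] [] [] [] []

-- ===== PORT B =====
def hashing_Values_alt (hshArry : List Int) (numArray : List Int) : List (List Int) :=
  (PySem.List.pyRange 0 11 1).map (fun r => numArray.filter (fun v => PySem.Int.mod v 11 == r))

-- ===== PRECONDITION & SPEC =====
-- Pre_ excludes exactly the inputs where A raises IndexError: some element's residue mod 11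
-- indexes past the end of hshArry (B raises there too).
def Pre_hashing_Values (hshArry : List Int) (numArray : List Int) : Prop :=
  ∀ v ∈ numArray, PySem.Int.mod v 11 < (hshArry.length : Int)
instance (hshArry : List Int) (numArray : List Int) : Decidable (Pre_hashing_Values hshArry numArray) := by unfold Pre_hashing_Values; infer_instance
def pvWitness_hashing_Values : List Int × List Int := ([0,0,0,0,0,0,0,0,0,0,0], [1, 12, 5, -3, 22])

def Spec_hashing_Values (hshArry : List Int) (numArray : List Int) (out : List (List Int)) : Prop := out = hashing_Values_alt hshArry numArray
instance (hshArry : List Int) (numArray : List Int) (out : List (List Int)) : Decidable (Spec_hashing_Values hshArry numArray out) := by unfold Spec_hashing_Values; infer_instance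

-- ===== CLAIM (what is proved, stated in full; the proofs are below) =====
def Claim_equal_hashing_Values : Prop := ∀ (hshArry : List Int) (numArray : List Int), Dom_hashing_Values hshArry numArray → Pre_hashing_Values hshArry numArray → Spec_hashing_Values hshArry numArray (hashing_Values hshArry numArray)

-- ===== LEMMAS AND PROOFS =====
theorem pvLoopA_eq (nums : List Int) : ∀ (h0 h1 h2 h3 h4 h5 h6 h7 h8 h9 h10 : List Int),
    pvLoopA nums h0 h1 h2 h3 h4 h5 h6 h7 h8 h9 h10 =
      [h0 ++ nums.filter (fun v => PySem.Int.mod v 11 == 0),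
       h1 ++ nums.filter (fun v => PySem.Int.mod v 11 == 1),
       h2 ++ nums.filter (fun v => PySem.Int.mod v 11 == 2),
       h3 ++ nums.filter (fun v => PySem.Int.mod v 11 == 3),
       h4 ++ nums.filter (fun v => PySem.Int.mod v 11 == 4),
       h5 ++ nums.filter (fun v => PySem.Int.mod v 11 == 5),
       h6 ++ nums.filter (fun v => PySem.Int.mod v 11 == 6),
       h7 ++ nums.filter (fun v => PySem.Int.mod v 11 == 7),
       h8 ++ nums.filter (fun v => PySem.Int.mod v 11 == 8),
       h9 ++ nums.filter (fun v => PySem.Int.mod v 11 == 9),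
       h10 ++ nums.filter (fun v => PySem.Int.mod v 11 == 10)] := by
  induction nums with
  | nil => intro _ _ _ _ _ _ _ _ _ _ _; simp [pvLoopA]
  | cons v rest ih =>
    intro h0 h1 h2 h3 h4 h5 h6 h7 h8 h9 h10
    have hlo : 0 ≤ PySem.Int.mod v 11 := by
      rw [PySem.Int.mod_eq_emod_of_pos (by norm_num)]; exact Int.emod_nonneg v (by norm_num)
    have hhi : PySem.Int.mod v 11 < 11 := by
      rw [PySem.Int.mod_eq_emod_of_pos (by norm_num)]; exact Int.emod_lt_of_pos v (by norm_num)
    simp only [pvLoopA]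
    interval_cases h : (PySem.Int.mod v 11) <;>
      · rw [PySem.Int.mod_eq_emod_of_pos (by norm_num)] at h
        simp [ih, h]
        try omega

theorem hashing_Values_spec : Claim_equal_hashing_Values := by
  intro hshArry numArray _ _
  unfold Spec_hashing_Values hashing_Values hashing_Values_alt
  rw [pvLoopA_eq]
  simp [PySem.List.pyRange, List.range_succ]
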